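-- pv_equiv track=rewrite | github.com/unabl4/codefights | fibonacci_snowman/fibonacci_snowman.py | fibonacciSnowman
-- ===== SOURCE A (Python) =====
-- F = [1,2,3,5,8,13,21,34,55,89,144,233,377,610,987,1597,2584,4181,6765,10946]
--
-- def fibonacciSnowman(n,k):
--     # part 1: https://www.geeksforgeeks.org/fibonacci-coding/
--     i = 0
--     while True:
--         if F[i] <= n and F[i+1] > n:
--             break
--         i += 1
--
--     # ---
--
--     v = [0] * (i+1)
--
--     while n:
--         v[i] = 1
--         n -= F[i]
--         i -= 1
--
--         while i >= 0 and F[i] > n: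
--             v[i] = 0
--             i -= 1
--
--     # ---
--     # From the description of the Fibonacci Coding algorithm (used in this solution) we know that it generates
--     # the SHORTEST representation (sum of Fibonacci numbers) of any given positive natural number N;
--     #
--     # Now comes the most important part (what this challenge is mostly about, I think)
--     # Since Fibonacci sequence elements (by definition) are the SUM of the previous two F-elements, we can utilize it for our advantage
--     # to increase the length of the sequence (our goal is K) summing to N;
--     # In other words, every time we "expand" an F-element, we increase the total length by 1 (the sum remains the same)
--     # In our case we will be iteratively finding a leftmost F-element greater than 1 (we cannot expand 1) and expanding it.
--
--     o = v.count(1) # number of occupied F-elements (must in the end equal to K)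
--     while o != k:
--         z = -1 # index of the F-element to be expanded into sum of two F-elements
--         for j in range(1,len(v)):
--             if v[j] != 0:
--                 z = j
--                 break
--
--
--         if z == 1:
--             # special case for two
--             v[z-1] += 2
--             v[z] -= 1
--         else:
--             v[z-2] += 1
--             v[z-1] += 1
--             v[z] -= 1
--
--         o += 1
--
--     # ---
--
--     r = [] # resulting vector
--     for t in range(len(v)):
--         r += [F[t]] * v[t]
--
--     return r
-- ===== SOURCE B (Python) =====
-- F = [1,2,3,5,8,13,21,34,55,89,144,233,377,610,987,1597,2584,4181,6765,10946]
--
-- def expand(j, t):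
--     # multiset (ascending) left after t smallest-first splits of the single
--     # Fibonacci number F[j]; 0 <= t <= F[j]-1
--     if t == 0:
--         return [F[j]]
--     if j == 1:
--         return [1, 1]
--     i = 0 if j == 2 else j - 2      # index of the smaller split part
--     a = F[i]
--     if t - 1 <= a - 1:
--         return expand(i, t - 1) + [F[j - 1]]
--     return [1] * a + expand(j - 1, t - a)
--
-- def fibonacciSnowman(n, k):
--     # greedy Zeckendorf: indices of the summands, collected largest first
--     idxs = []
--     m = n
--     for j in range(len(F) - 1, -1, -1):
--         if F[j] <= m:
--             m -= F[j]
--             idxs.append(j)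
--     idxs.reverse()
--     s = k - len(idxs)               # number of splits still owed
--     out = []
--     while s > 0:                    # spend the whole budget, summand by summand
--         j = idxs.pop(0)
--         t = min(s, F[j] - 1)        # splits this summand can absorb, all at once
--         s -= t
--         out += expand(j, t)
--     return out + [F[j] for j in idxs]
-- ===== Notes on version B (the rewrite author's own statement) =====
-- stated objective: alternative
-- what changed: B has no multiset-splitting loop at all: it computes the split budget s = k - (greedy length) once and, consuming the Zeckendorf summands in ascending order, spends min(s, F[j]-1) splits on each summand in one step via a recursive closed-form expand(j,t) that returns the multiset left after t smallest-first splits of a single Fibonacci number, replacing A's (k - greedy length)-iteration scan-and-mutate loop over an index-count array.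
-- outside the precondition, e.g. on fibonacciSnowman(3, 5): A returns [1, 1, 1, 1, 1, 1], B raises IndexError; on fibonacciSnowman(7, 1): A does not finish within the time limit, B returns [2, 5]; on fibonacciSnowman(0, 1): A raises IndexError, B raises IndexError
import Mathlib
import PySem

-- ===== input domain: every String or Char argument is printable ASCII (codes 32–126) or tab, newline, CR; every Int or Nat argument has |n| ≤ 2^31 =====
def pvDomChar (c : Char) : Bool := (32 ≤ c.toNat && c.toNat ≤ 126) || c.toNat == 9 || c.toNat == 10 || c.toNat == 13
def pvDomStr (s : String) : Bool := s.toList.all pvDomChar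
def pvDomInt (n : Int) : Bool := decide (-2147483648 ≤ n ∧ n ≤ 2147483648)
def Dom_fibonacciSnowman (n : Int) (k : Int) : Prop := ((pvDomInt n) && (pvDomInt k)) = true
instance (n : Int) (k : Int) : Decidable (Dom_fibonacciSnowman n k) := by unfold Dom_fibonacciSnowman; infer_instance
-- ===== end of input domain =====

-- B removes A's splitting loop entirely: it computes the split budget k - (greedy length)
-- once and expands each greedy summand in one step by a recursive closed form expand(j,t);
-- same return value on all inputs admitted by Pre_ (neither version mutates its arguments).

-- the module-level constant F (shared by both sources)
def pvF : List Int := [1,2,3,5,8,13,21,34,55,89,144,233,377,610,987,1597,2584,4181,6765,10946]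

-- F[j] for a nonnegative index j (B's source only indexes F at 0 ≤ j < len(F))
def pvFv (j : Nat) : Int := pvF.getD j 0

-- ===== PORT A =====
-- part 1: `while True: if F[i] <= n and F[i+1] > n: break; i += 1` (fuel 20 covers the table;
-- where Python raises IndexError the port's result is irrelevant, those inputs are outside Pre_)
def aFindI (n : Int) : Nat → Nat → Nat
  | 0, i => i
  | fuel+1, i =>
    if PySem.List.pyGetD pvF (i : Int) 0 ≤ n ∧ PySem.List.pyGetD pvF ((i : Int)+1) 0 > n then i
    else aFindI n fuel (i+1)

-- inner `while i >= 0 and F[i] > n: v[i] = 0; i -= 1`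
def aInner (nn : Int) : Nat → Int × List Int → Int × List Int
  | 0, s => s
  | fuel+1, (i, v) =>
    if i ≥ 0 ∧ PySem.List.pyGetD pvF i 0 > nn then
      aInner nn fuel (i - 1, PySem.List.pySetD v i 0)
    else (i, v)

-- outer `while n: v[i] = 1; n -= F[i]; i -= 1; <inner loop>`
def aOuter : Nat → Int → Int → List Int → List Int
  | 0, _, _, v => v
  | fuel+1, n, i, v =>
    if n ≠ 0 then
      let v1 := PySem.List.pySetD v i 1
      let n1 := n - PySem.List.pyGetD pvF i 0
      let s := aInner n1 21 (i - 1, v1)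
      aOuter fuel n1 s.1 s.2
    else v

-- `z = -1; for j in range(1, len(v)): if v[j] != 0: z = j; break`
def aFindZGo (v : List Int) : List Int → Int
  | [] => -1
  | j :: js => if PySem.List.pyGetD v j 0 ≠ 0 then j else aFindZGo v js

def aFindZ (v : List Int) : Int :=
  aFindZGo v (PySem.List.pyRange 1 (PySem.List.len v) 1)

-- one body of `while o != k`
def aStep (v : List Int) : List Int :=
  let z := aFindZ v
  if z = 1 then
    let v1 := PySem.List.pySetD v (z-1) (PySem.List.pyGetD v (z-1) 0 + 2)
    PySem.List.pySetD v1 z (PySem.List.pyGetD v1 z 0 - 1)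
  else
    let v1 := PySem.List.pySetD v (z-2) (PySem.List.pyGetD v (z-2) 0 + 1)
    let v2 := PySem.List.pySetD v1 (z-1) (PySem.List.pyGetD v1 (z-1) 0 + 1)
    PySem.List.pySetD v2 z (PySem.List.pyGetD v2 z 0 - 1)

-- `while o != k: <step>; o += 1` (fuel (k-o).toNat: exact iteration count when o ≤ k;
-- when o > k Python diverges, those inputs are outside Pre_)
def aLoop (k : Int) : Nat → List Int → Int → List Int
  | 0, v, _ => v
  | fuel+1, v, o => if o ≠ k then aLoop k fuel (aStep v) (o+1) else v

-- `r = []; for t in range(len(v)): r += [F[t]] * v[t]`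
def aRender (v : List Int) : List Int :=
  (PySem.List.pyRange 0 (PySem.List.len v) 1).foldl
    (fun r t => r ++ PySem.List.pyRepeat [PySem.List.pyGetD pvF t 0] (PySem.List.pyGetD v t 0)) []

def fibonacciSnowman (n : Int) (k : Int) : List Int :=
  let i := aFindI n 20 0
  let v := List.replicate (i+1) 0
  let v := aOuter 21 n (i : Int) v
  let o : Int := (PySem.List.count v 1 : Int)
  aRender (aLoop k ((k - o).toNat) v o)

-- ===== PORT B =====
-- expand(j, t): the multiset (ascending) left after t smallest-first splits of the single
-- Fibonacci number F[j], for 0 <= t <= F[j]-1.  The source recurses on the index j; the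
-- cases j = 1 and j = 2 are its `if j == 1` and `i = 0 if j == 2` special cases.
-- expand(0, t) with t ≠ 0 is unreachable from the entry (the caller passes
-- t = min(s, F[0]-1) = 0 there, given s ≥ 0); the port returns [F[0]] in that dead branch.
def bExpand : Nat → Int → List Int
  | 0, _t => [pvFv 0]
  | 1, t => if t = 0 then [pvFv 1] else [1, 1]
  | 2, t =>
    if t = 0 then [pvFv 2]
    else if t - 1 ≤ pvFv 0 - 1 then bExpand 0 (t - 1) ++ [pvFv 1]
    else PySem.List.pyRepeat [1] (pvFv 0) ++ bExpand 1 (t - pvFv 0)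
  | (h+3), t =>
    if t = 0 then [pvFv (h+3)]
    else if t - 1 ≤ pvFv (h+1) - 1 then bExpand (h+1) (t - 1) ++ [pvFv (h+2)]
    else PySem.List.pyRepeat [1] (pvFv (h+1)) ++ bExpand (h+2) (t - pvFv (h+1))

-- `while s > 0: j = idxs.pop(0); t = min(s, F[j]-1); s -= t; out += expand(j, t)`
-- then `return out + [F[j] for j in idxs]`; when the budget s is still positive on an
-- empty list Python raises IndexError at idxs.pop(0) — those inputs are outside Pre_
def bGo : List Nat → Int → List Int
  | [], _ => []
  | j :: r, s =>
    if 0 < s then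
      bExpand j (min s (pvFv j - 1)) ++ bGo r (s - min s (pvFv j - 1))
    else (j :: r).map (fun j => pvFv j)

-- `for j in range(len(F)-1, -1, -1): if F[j] <= m: m -= F[j]; idxs.append(j)` then
-- `idxs.reverse()`; `s = k - len(idxs)`; the budget loop bGo above
def fibonacciSnowman_alt (n : Int) (k : Int) : List Int :=
  let g := (List.range pvF.length).reverse.foldl
      (fun (st : Int × List Nat) j =>
        if pvFv j ≤ st.1 then (st.1 - pvFv j, st.2 ++ [j]) else st)
      (n, [])
  let idxs := g.2.reverse
  let s : Int := k - (idxs.length : Int)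
  bGo idxs s

-- ===== PRECONDITION & SPEC =====
-- the number of terms of the greedy (Zeckendorf) representation of n — the minimal number
-- of Fibonacci summands; used only to state Pre_ below
def pvZeckLen (n : Int) : Int :=
  (pvF.reverse.foldl (fun (s : Int × Int) f => if f ≤ s.1 then (s.1 - f, s.2 + 1) else s) (n, 0)).2

-- Pre_ excludes: n outside 1..10945 (A's table lookup F[i]/F[i+1] raises IndexError),
-- k below the minimal summand count pvZeckLen n (A's `while o != k` loop never terminates),
-- and k > n (no representation of n as k positive Fibonacci numbers exists: A's returned
-- list there is an accident of negative-index list mutation — or an IndexError for n < 3 —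
-- while B's own budget loop exhausts the summand list and raises IndexError at pop(0)).
def Pre_fibonacciSnowman (n : Int) (k : Int) : Prop :=
  1 ≤ n ∧ n ≤ 10945 ∧ pvZeckLen n ≤ k ∧ k ≤ n
instance (n : Int) (k : Int) : Decidable (Pre_fibonacciSnowman n k) := by
  unfold Pre_fibonacciSnowman; infer_instance

def pvWitness_fibonacciSnowman : Int × Int := (5, 3)

def Spec_fibonacciSnowman (n : Int) (k : Int) (out : List Int) : Prop := out = fibonacciSnowman_alt n k
instance (n : Int) (k : Int) (out : List Int) : Decidable (Spec_fibonacciSnowman n k out) := by unfold Spec_fibonacciSnowman; infer_instance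

-- ===== CLAIM (what is proved, stated in full; the proofs are below) =====
def Claim_equal_fibonacciSnowman : Prop := ∀ (n : Int) (k : Int), Dom_fibonacciSnowman n k → Pre_fibonacciSnowman n k → Spec_fibonacciSnowman n k (fibonacciSnowman n k)

-- ===== LEMMAS AND PROOFS =====

-- proof-side abstraction: A's vector as a 0/1 mask over "mask ids" (mask id x stands for
-- the Fibonacci index x+1; index 0, the value 1, is tracked by the leading counter)
def pvMask (L : Nat) (ids : List Nat) : List Int :=
  (List.range L).map (fun j => if j ∈ ids then 1 else 0)

-- abstract greedy descent: positions p,p-1,…,0; returns (number of 1s, ascending mask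
-- ids of the taken values ≥ 2)
def gzI : Nat → Int → Int × List Nat
  | 0, m => (if 1 ≤ m then 1 else 0, [])
  | p+1, m =>
    if pvFv (p+1) ≤ m then
      let s := gzI p (m - pvFv (p+1)); (s.1, s.2 ++ [p])
    else gzI p m

-- the ascending list of Fibonacci INDICES the greedy takes (what B's phase 1 collects)
def gzJ (p : Nat) (m : Int) : List Nat :=
  (if (gzI p m).1 = 1 then [0] else []) ++ ((gzI p m).2).map (· + 1)

-- one abstract split of the smallest summand, on (count of 1s, ascending mask ids)
def sStep : Int × List Nat → Int × List Nat
  | (c, []) => (c, [])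
  | (c, 0 :: t) => (c + 2, t)
  | (c, 1 :: t) => (c + 1, 0 :: t)
  | (c, (h+2) :: t) => (c, h :: (h+1) :: t)

-- state after t smallest-first splits of the single summand with mask id x:
-- (ones produced, remaining mask ids, ascending); mirrors bExpand's recursion
def eState : Nat → Int → Int × List Nat
  | 0, t => if t = 0 then ((0:Int), [0]) else (2, [])
  | 1, t => if t = 0 then ((0:Int), [1]) else if t = 1 then (1, [0]) else (3, [])
  | (h+2), t =>
    if t = 0 then ((0:Int), [h+2])
    else if t - 1 ≤ pvFv (h+1) - 1 then
      ((eState h (t-1)).1, (eState h (t-1)).2 ++ [h+1])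
    else (pvFv (h+1) + (eState (h+1) (t - pvFv (h+1))).1, (eState (h+1) (t - pvFv (h+1))).2)

-- B's per-summand budget loop, recursively (what the foldl in the port accumulates)
def bOutJ : List Nat → Int → List Int
  | [], _ => []
  | j :: l, s => bExpand j (min s (pvFv j - 1)) ++ bOutJ l (s - min s (pvFv j - 1))

-- where A's inner skip loop stops, starting at index j with remainder m
def innerStop : Nat → Int → Int
  | 0, m => if (1:Int) ≤ m then 0 else -1
  | j+1, m => if pvFv (j+1) ≤ m then ((j:Int)+1) else innerStop j m

-- concrete facts about the table pvF
lemma fv_mono : ∀ {a b : Nat}, a ≤ b → b ≤ 19 → pvFv a ≤ pvFv b := by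
  have h : ∀ b < 20, ∀ a < 20, a ≤ b → pvFv a ≤ pvFv b := by decide
  intro a b hab hb; exact h b (by omega) a (by omega) hab

lemma fv_pos : ∀ {j : Nat}, j ≤ 19 → 1 ≤ pvFv j := by
  have h : ∀ j < 20, 1 ≤ pvFv j := by decide
  intro j hj; exact h j (by omega)

lemma fv_fib : ∀ {z : Nat}, 2 ≤ z → z ≤ 19 → pvFv z = pvFv (z-1) + pvFv (z-2) := by
  have h : ∀ z < 20, 2 ≤ z → pvFv z = pvFv (z-1) + pvFv (z-2) := by decide
  intro z h2 hz; exact h z (by omega) h2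

lemma fv_ge2 : ∀ {j : Nat}, 1 ≤ j → j ≤ 19 → 2 ≤ pvFv j := by
  have h : ∀ j < 20, 1 ≤ j → 2 ≤ pvFv j := by decide
  intro j h1 hj; exact h j (by omega) h1

lemma fv_nonneg : ∀ (j : Nat), 0 ≤ pvFv j := by
  intro j
  rcases lt_or_ge j 20 with h | h
  · have hall : ∀ j < 20, 0 ≤ pvFv j := by decide
    exact hall j h
  · unfold pvFv
    rw [List.getD_eq_default _ _ (by simpa [pvF] using h)]

-- indexing / setting helpers on the cons+mask representation
lemma pySetD_natCast {α : Type} (xs : List α) (h : Nat) (x : α) (hh : h < xs.length) :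
    PySem.List.pySetD xs (h : Int) x = xs.set h x := by
  unfold PySem.List.pySetD PySem.List.pySet? PySem.List.pyIdx?
  rw [if_pos (by positivity), if_pos (by exact_mod_cast hh)]
  simp

lemma pyGetD_mask (L : Nat) (ids : List Nat) (h : Nat) (hh : h < L) :
    PySem.List.pyGetD (pvMask L ids) (h : Int) 0 = if h ∈ ids then 1 else 0 := by
  simp [pvMask, PySem.List.pyGetD, PySem.List.pyGet?, PySem.List.pyIdx?, hh]

lemma mask_set_one (L : Nat) (ids : List Nat) (h : Nat) (hh : h < L) (hmem : h ∉ ids) :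
    (pvMask L ids).set h 1 = pvMask L (h :: ids) := by
  apply List.ext_getElem
  · simp [pvMask]
  · intro j hj1 hj2
    simp only [pvMask, List.length_set, List.length_map, List.length_range] at hj1 hj2 ⊢
    rw [List.getElem_set]
    by_cases hjh : h = j
    · subst hjh; simp [pvMask, hj2]
    · have hjh' : j ≠ h := fun e => hjh e.symm
      simp [pvMask, hjh, hj2, hjh']

lemma mask_set_zero (L : Nat) (ids : List Nat) (h : Nat) (hh : h < L)
    (hnd : ∀ x ∈ ids, h ≠ x) :
    (pvMask L ids).set h 0 = pvMask L ids := by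
  apply List.ext_getElem
  · simp [pvMask]
  · intro j hj1 hj2
    simp only [pvMask, List.length_set, List.length_map, List.length_range] at hj1 hj2 ⊢
    rw [List.getElem_set]
    by_cases hjh : h = j
    · subst hjh
      have : h ∉ ids := fun hc => hnd h hc rfl
      simp [pvMask, this, hj2]
    · simp [hjh]

lemma mask_set_erase (L : Nat) (ids : List Nat) (h : Nat) (t : List Nat) (hh : h < L)
    (hids : ids = h :: t) (hnt : h ∉ t) :
    (pvMask L ids).set h 0 = pvMask L t := by
  subst hids
  apply List.ext_getElem
  · simp [pvMask]
  · intro j hj1 hj2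
    simp only [pvMask, List.length_set, List.length_map, List.length_range] at hj1 hj2 ⊢
    rw [List.getElem_set]
    by_cases hjh : h = j
    · subst hjh; simp [pvMask, hnt, hj2]
    · have hjh' : j ≠ h := fun e => hjh e.symm
      simp [pvMask, hjh, hj2, hjh']

lemma mask_perm (L : Nat) (ids ids' : List Nat) (hp : ids.Perm ids') :
    pvMask L ids = pvMask L ids' := by
  unfold pvMask
  apply List.map_congr_left
  intro j _
  simp [hp.mem_iff]

lemma getD_cons_succ {α : Type} (a : α) (w : List α) (h : Nat) (d : α) :
    PySem.List.pyGetD (a :: w) ((h : Int)+1) d = PySem.List.pyGetD w (h : Int) d := by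
  simp [PySem.List.pyGetD, PySem.List.pyGet?_cons_succ]

lemma getD_cons_zero {α : Type} (a : α) (w : List α) (d : α) :
    PySem.List.pyGetD (a :: w) 0 d = a := by
  simp [PySem.List.pyGetD, PySem.List.pyGet?_zero_cons]

lemma setD_cons_succ {α : Type} (a : α) (w : List α) (h : Nat) (x : α) (hh : h < w.length) :
    PySem.List.pySetD (a :: w) ((h : Int)+1) x = a :: w.set h x := by
  have : ((h : Int)+1) = ((h+1 : Nat) : Int) := by push_cast; ring
  rw [this, pySetD_natCast _ _ _ (by simpa using hh)]
  rfl

lemma setD_cons_zero {α : Type} (a : α) (w : List α) (x : α) :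
    PySem.List.pySetD (a :: w) 0 x = x :: w := by
  have : (0 : Int) = ((0 : Nat) : Int) := rfl
  rw [this, pySetD_natCast _ _ _ (by simp)]
  rfl

-- the leftmost-nonzero scan on a masked vector finds the head of the sorted id list
lemma findZGo_mask (v0 : Int) (L : Nat) (ids : List Nat) (hp : ids.Pairwise (· < ·))
    (hb : ∀ x ∈ ids, x < L) :
    ∀ (c h : Nat), h + 1 + c = L + 1 → (∀ x ∈ ids, h ≤ x) →
      aFindZGo (v0 :: pvMask L ids) (PySem.List.pyRange ((h : Int)+1) ((L : Int)+1) 1)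
        = (match ids with | [] => -1 | x :: _ => (x : Int)+1) := by
  intro c
  induction c with
  | zero =>
    intro h hc hlow
    have hids : ids = [] := by
      cases ids with
      | nil => rfl
      | cons x t =>
        have h1 := hlow x (by simp)
        have h2 := hb x (by simp)
        omega
    subst hids
    rw [PySem.List.pyRange_one_eq_nil (by omega)]
    rfl
  | succ c ih =>
    intro h hc hlow
    rw [PySem.List.pyRange_one_cons (by omega)]
    have hhL : h < L := by omega
    unfold aFindZGo
    rw [getD_cons_succ, pyGetD_mask L ids h hhL]
    cases ids with
    | nil =>
      simp only [List.not_mem_nil, if_false]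
      have : ((h : Int) + 1 + 1) = (((h+1 : Nat) : Int) + 1) := by push_cast; ring
      rw [if_neg (by simp), this, ih (h+1) (by omega) (by simp)]
    | cons x t =>
      by_cases hx : h = x
      · subst hx
        simp only [List.mem_cons, true_or, if_true]
        rw [if_pos (by norm_num)]
      · have hnm : h ∉ x :: t := by
          intro hmem
          rcases List.mem_cons.mp hmem with h1 | h1
          · exact hx h1
          · have hxh := (List.pairwise_cons.mp hp).1 h h1
            have := hlow x (by simp)
            omega
        simp only [hnm, if_false]
        rw [if_neg (by simp)]
        have : ((h : Int) + 1 + 1) = (((h+1 : Nat) : Int) + 1) := by push_cast; ring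
        rw [this, ih (h+1) (by omega) ?_]
        intro y hy
        rcases List.mem_cons.mp hy with h1 | h1
        · subst h1; have := hlow y (by simp); omega
        · have hxl := hlow x (by simp)
          have := (List.pairwise_cons.mp hp).1 y h1
          omega

lemma findZ_mask (v0 : Int) (L : Nat) (ids : List Nat) (hp : ids.Pairwise (· < ·))
    (hb : ∀ x ∈ ids, x < L) :
    aFindZ (v0 :: pvMask L ids)
      = (match ids with | [] => -1 | x :: _ => (x : Int)+1) := by
  unfold aFindZ
  have hlen : PySem.List.len (v0 :: pvMask L ids) = (L : Int) + 1 := by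
    simp [PySem.List.len_eq, pvMask]
  rw [hlen]
  have h := findZGo_mask v0 L ids hp hb L 0 (by omega) (by omega)
  norm_num at h
  exact h

-- with everything below h filtered away, the sorted id list is untouched
lemma filter_ge_cons (h : Nat) : ∀ (ids : List Nat), ids.Pairwise (· < ·) →
    (h ∈ ids → ids.filter (fun x => decide (h ≤ x))
        = h :: ids.filter (fun x => decide (h+1 ≤ x)))
    ∧ (h ∉ ids → ids.filter (fun x => decide (h ≤ x))
        = ids.filter (fun x => decide (h+1 ≤ x))) := by
  intro ids
  induction ids with
  | nil => simp
  | cons a t ih =>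
    intro hp
    obtain ⟨ha, hpt⟩ := List.pairwise_cons.mp hp
    refine ⟨?_, ?_⟩
    · intro hmem
      rcases List.mem_cons.mp hmem with h1 | h1
      · subst h1
        have h2 : t.filter (fun x => decide (h ≤ x)) = t := by
          apply List.filter_eq_self.mpr
          intro x hx; simp only [decide_eq_true_eq]; have := ha x hx; omega
        have h3 : t.filter (fun x => decide (h+1 ≤ x)) = t := by
          apply List.filter_eq_self.mpr
          intro x hx; simp only [decide_eq_true_eq]; have := ha x hx; omega
        have e1 : (h :: t).filter (fun x => decide (h ≤ x)) = h :: t := by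
          rw [List.filter_cons_of_pos (by simp), h2]
        have e2 : (h :: t).filter (fun x => decide (h+1 ≤ x)) = t := by
          rw [List.filter_cons_of_neg (by simp), h3]
        rw [e1, e2]
      · have hah := ha h h1
        have hna : ¬ (h ≤ a) := by omega
        have hna1 : ¬ (h+1 ≤ a) := by omega
        simp only [List.filter_cons, decide_eq_true_eq, hna, hna1, if_false]
        exact ((ih hpt).1 h1)
    · intro hnm
      have hhna : h ≠ a := fun e => hnm (e ▸ List.mem_cons_self ..)
      have hnt : h ∉ t := fun hc => hnm (List.mem_cons_of_mem _ hc)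
      by_cases hle : h ≤ a
      · have h1 : h + 1 ≤ a := by omega
        simp only [List.filter_cons, decide_eq_true_eq, hle, h1, if_true]
        rw [(ih hpt).2 hnt]
      · have h1 : ¬ (h+1 ≤ a) := by omega
        simp only [List.filter_cons, decide_eq_true_eq, hle, h1, if_false]
        exact (ih hpt).2 hnt

-- rendering a masked vector: [1]*v0 followed by the Fibonacci values of the ids, in order
lemma renderGo_mask (v0 : Int) (L : Nat) (ids : List Nat) (hL : L ≤ 18)
    (hp : ids.Pairwise (· < ·)) (hb : ∀ x ∈ ids, x < L) :
    ∀ (c h : Nat) (r : List Int), h + 1 + c = L + 1 →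
      (PySem.List.pyRange ((h : Int)+1) (((L : Int))+1) 1).foldl
        (fun r t => r ++ PySem.List.pyRepeat [PySem.List.pyGetD pvF t 0]
          (PySem.List.pyGetD (v0 :: pvMask L ids) t 0)) r
        = r ++ (ids.filter (fun x => decide (h ≤ x))).map (fun x => pvFv (x+1)) := by
  intro c
  induction c with
  | zero =>
    intro h r hc
    have hids : ids.filter (fun x => decide (h ≤ x)) = [] := by
      apply List.filter_eq_nil_iff.mpr
      intro x hx
      have := hb x hx
      simp only [decide_eq_true_eq]
      omega
    rw [PySem.List.pyRange_one_eq_nil (by omega)]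
    simp [hids]
  | succ c ih =>
    intro h r hc
    rw [PySem.List.pyRange_one_cons (by omega)]
    have hhL : h < L := by omega
    simp only [List.foldl_cons]
    rw [getD_cons_succ, pyGetD_mask L ids h hhL]
    have hcast : ((h : Int) + 1 + 1) = (((h+1 : Nat) : Int) + 1) := by push_cast; ring
    have hfv : PySem.List.pyGetD pvF ((h : Int)+1) 0 = pvFv (h+1) := by
      have h2 : ((h : Int)+1) = ((h+1 : Nat) : Int) := by push_cast; ring
      rw [h2, PySem.List.pyGetD_natCast]
      rfl
    by_cases hmem : h ∈ ids
    · simp only [hmem, if_true]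
      rw [hcast, ih (h+1) _ (by omega), hfv]
      rw [(filter_ge_cons h ids hp).1 hmem]
      simp [PySem.List.pyRepeat_singleton]
    · simp only [hmem, if_false]
      rw [hcast, ih (h+1) _ (by omega)]
      rw [(filter_ge_cons h ids hp).2 hmem]
      simp [PySem.List.pyRepeat]

lemma render_mask (v0 : Int) (L : Nat) (ids : List Nat) (hL : L ≤ 18)
    (hp : ids.Pairwise (· < ·)) (hb : ∀ x ∈ ids, x < L) :
    aRender (v0 :: pvMask L ids)
      = PySem.List.pyRepeat [1] v0 ++ ids.map (fun x => pvFv (x+1)) := by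
  unfold aRender
  have hlen : PySem.List.len (v0 :: pvMask L ids) = (L : Int) + 1 := by
    simp [PySem.List.len_eq, pvMask]
  rw [hlen, PySem.List.pyRange_one_cons (by omega)]
  simp only [List.foldl_cons]
  rw [getD_cons_zero]
  have h0 : PySem.List.pyGetD pvF 0 0 = 1 := by decide
  rw [h0]
  have h1 : ((0 : Int) + 1) = (((0 : Nat)) : Int) + 1 := by norm_num
  rw [h1, renderGo_mask v0 L ids hL hp hb L 0 _ (by omega)]
  have hf : ids.filter (fun x => decide (0 ≤ x)) = ids := by
    apply List.filter_eq_self.mpr; intro x _; simp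
  rw [hf]
  simp

lemma findZ_mask_cons (v0 : Int) (L : Nat) (h : Nat) (t : List Nat)
    (hp : (h :: t).Pairwise (· < ·)) (hb : ∀ x ∈ h :: t, x < L) :
    aFindZ (v0 :: pvMask L (h :: t)) = (h : Int) + 1 := by
  simpa using findZ_mask v0 L (h :: t) hp hb

lemma getD_cons_one {α : Type} (a : α) (w : List α) (d : α) :
    PySem.List.pyGetD (a :: w) 1 d = PySem.List.pyGetD w 0 d := by
  simpa using getD_cons_succ a w 0 d

lemma setD_cons_one {α : Type} (a : α) (w : List α) (x : α) (hw : 0 < w.length) :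
    PySem.List.pySetD (a :: w) 1 x = a :: w.set 0 x := by
  simpa using setD_cons_succ a w 0 x hw

lemma getD_mask0 (L : Nat) (ids : List Nat) (hh : 0 < L) :
    PySem.List.pyGetD (pvMask L ids) 0 0 = if 0 ∈ ids then 1 else 0 := by
  simpa using pyGetD_mask L ids 0 hh

lemma mask_len (L : Nat) (ids : List Nat) : (pvMask L ids).length = L := by
  simp [pvMask]

-- one split step, A side, on a masked vector whose least id is h
lemma aStep_mask0 (L : Nat) (hL : L ≤ 18) (v0 : Int) (t : List Nat)
    (hp : ((0:Nat) :: t).Pairwise (· < ·)) (hb : ∀ x ∈ (0:Nat) :: t, x < L) :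
    aStep (v0 :: pvMask L (0 :: t)) = (v0 + 2) :: pvMask L t := by
  have hz := findZ_mask_cons v0 L 0 t hp hb
  have hhL : (0:Nat) < L := hb 0 (by simp)
  have htgt : ∀ x ∈ t, 0 < x := (List.pairwise_cons.mp hp).1
  have hnt : (0:Nat) ∉ t := fun hc => absurd (htgt 0 hc) (by omega)
  unfold aStep
  rw [hz]
  norm_num
  rw [setD_cons_zero, getD_cons_one, setD_cons_one _ _ _ (by rw [mask_len]; omega),
      getD_mask0 L (0 :: t) hhL, if_pos (by simp)]
  norm_num
  rw [mask_set_erase L (0 :: t) 0 t hhL rfl hnt]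

lemma aStep_mask1 (L : Nat) (hL : L ≤ 18) (v0 : Int) (t : List Nat)
    (hp : ((1:Nat) :: t).Pairwise (· < ·)) (hb : ∀ x ∈ (1:Nat) :: t, x < L) :
    aStep (v0 :: pvMask L (1 :: t)) = (v0 + 1) :: pvMask L (0 :: t) := by
  have hz := findZ_mask_cons v0 L 1 t hp hb
  have hhL : (1:Nat) < L := hb 1 (by simp)
  have htgt : ∀ x ∈ t, 1 < x := (List.pairwise_cons.mp hp).1
  have h0m : (0 : Nat) ∉ (1 :: t) := by
    simp only [List.mem_cons]
    push_neg
    exact ⟨by omega, fun hc => absurd (htgt 0 hc) (by omega)⟩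
  have h1nt : (1:Nat) ∉ (0 :: t) := by
    simp only [List.mem_cons]
    push_neg
    exact ⟨by omega, fun hc => absurd (htgt 1 hc) (by omega)⟩
  unfold aStep
  rw [hz]
  norm_num
  rw [setD_cons_zero, getD_cons_one, setD_cons_one _ _ _ (by rw [mask_len]; omega),
      getD_mask0 L (1 :: t) (by omega), if_neg h0m]
  norm_num
  rw [mask_set_one L (1 :: t) 0 (by omega) h0m]
  have e2 : (2 : Int) = ((1 : Nat) : Int) + 1 := by norm_num
  rw [e2, getD_cons_succ, setD_cons_succ _ _ _ _ (by rw [mask_len]; omega),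
      pyGetD_mask L (0 :: 1 :: t) 1 hhL, if_pos (by simp)]
  norm_num
  rw [mask_perm L (0 :: 1 :: t) (1 :: 0 :: t) (List.Perm.swap _ _ _),
      mask_set_erase L (1 :: 0 :: t) 1 (0 :: t) hhL rfl h1nt]

lemma aStep_mask2 (L : Nat) (hL : L ≤ 18) (v0 : Int) (h' : Nat) (t : List Nat)
    (hp : ((h'+2) :: t).Pairwise (· < ·)) (hb : ∀ x ∈ (h'+2) :: t, x < L) :
    aStep (v0 :: pvMask L ((h'+2) :: t)) = v0 :: pvMask L (h' :: (h'+1) :: t) := by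
  have hz := findZ_mask_cons v0 L (h'+2) t hp hb
  have hhL : h'+2 < L := hb (h'+2) (by simp)
  have htgt : ∀ x ∈ t, h'+2 < x := (List.pairwise_cons.mp hp).1
  have hm0 : h' ∉ ((h'+2) :: t) := by
    simp only [List.mem_cons]
    push_neg
    exact ⟨by omega, fun hc => absurd (htgt h' hc) (by omega)⟩
  have hm1 : h'+1 ∉ (h' :: (h'+2) :: t) := by
    simp only [List.mem_cons]
    push_neg
    exact ⟨by omega, by omega, fun hc => absurd (htgt (h'+1) hc) (by omega)⟩
  have hm2 : (h'+2) ∉ ((h'+1) :: h' :: t) := by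
    simp only [List.mem_cons]
    push_neg
    exact ⟨by omega, by omega, fun hc => absurd (htgt (h'+2) hc) (by omega)⟩
  unfold aStep
  rw [hz, if_neg (by push_cast; omega)]
  simp only []
  have e1 : ((h'+2 : Nat) : Int) + 1 - 2 = ((h' : Nat) : Int) + 1 := by push_cast; ring
  rw [e1, getD_cons_succ, setD_cons_succ _ _ _ _ (by rw [mask_len]; omega),
      pyGetD_mask L ((h'+2) :: t) h' (by omega), if_neg hm0, zero_add,
      mask_set_one L ((h'+2) :: t) h' (by omega) hm0]
  have e2 : ((h'+2 : Nat) : Int) + 1 - 1 = ((h'+1 : Nat) : Int) + 1 := by push_cast; ring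
  rw [e2, getD_cons_succ, setD_cons_succ _ _ _ _ (by rw [mask_len]; omega),
      pyGetD_mask L (h' :: (h'+2) :: t) (h'+1) (by omega), if_neg hm1, zero_add,
      mask_set_one L (h' :: (h'+2) :: t) (h'+1) (by omega) hm1]
  rw [getD_cons_succ, setD_cons_succ _ _ _ _ (by rw [mask_len]; omega),
      pyGetD_mask L ((h'+1) :: h' :: (h'+2) :: t) (h'+2) hhL, if_pos (by simp),
      show (1:Int) - 1 = 0 by norm_num]
  rw [mask_perm L ((h'+1) :: h' :: (h'+2) :: t) ((h'+2) :: (h'+1) :: h' :: t)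
        ((List.Perm.cons (h'+1) (List.Perm.swap (h'+2) h' t)).trans
          (List.Perm.swap (h'+2) (h'+1) (h' :: t))),
      mask_set_erase L ((h'+2) :: (h'+1) :: h' :: t) (h'+2) ((h'+1) :: h' :: t) hhL rfl hm2,
      mask_perm L ((h'+1) :: h' :: t) (h' :: (h'+1) :: t) (List.Perm.swap _ _ _)]

-- A's phase-2 loop tracked against the abstract split iteration sStep^[fuel]
lemma phase2_sim (L : Nat) (hL : L ≤ 18) (n k : Int) (hkn : k ≤ n) :
    ∀ (fuel : Nat) (v0 : Int) (ids : List Nat) (o : Int),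
      ids.Pairwise (· < ·) → (∀ x ∈ ids, x < L) →
      0 ≤ v0 → o = v0 + ids.length → v0 + ((ids.map (fun x => pvFv (x+1))).sum) = n →
      o ≤ k → fuel = (k - o).toNat →
      ∃ v0' ids', ids'.Pairwise (· < ·) ∧ (∀ x ∈ ids', x < L) ∧ 0 ≤ v0' ∧
        aLoop k fuel (v0 :: pvMask L ids) o = v0' :: pvMask L ids' ∧
        sStep^[fuel] (v0, ids) = (v0', ids') := by
  intro fuel
  induction fuel with
  | zero =>
    intro v0 ids o hp hb hv0 ho hsum hok hfuel
    exact ⟨v0, ids, hp, hb, hv0, rfl, rfl⟩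
  | succ fuel ih =>
    intro v0 ids o hp hb hv0 ho hsum hok hfuel
    have holt : o < k := by omega
    rw [show aLoop k (fuel+1) (v0 :: pvMask L ids) o
          = aLoop k fuel (aStep (v0 :: pvMask L ids)) (o+1) from by
        unfold aLoop; rw [if_pos (by omega)]; cases fuel <;> rfl]
    rw [Function.iterate_succ_apply]
    cases ids with
    | nil =>
      exfalso
      simp at hsum ho
      omega
    | cons h t =>
      have hpt : t.Pairwise (· < ·) := (List.pairwise_cons.mp hp).2
      have htgt : ∀ x ∈ t, h < x := (List.pairwise_cons.mp hp).1
      have hbt : ∀ x ∈ t, x < L := fun x hx => hb x (List.mem_cons_of_mem _ hx)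
      have hhL : h < L := hb h (by simp)
      match h, htgt, hhL with
      | 0, htgt, hhL =>
        rw [aStep_mask0 L hL v0 t hp hb,
            show sStep (v0, 0 :: t) = (v0 + 2, t) from rfl]
        refine ih (v0+2) t (o+1) hpt hbt (by omega) (by simp only [List.length_cons] at ho ⊢; push_cast at ho ⊢; omega) ?_ (by omega) (by omega)
        simp only [List.map_cons, List.sum_cons] at hsum
        have : pvFv (0+1) = 2 := by decide
        omega
      | 1, htgt, hhL =>
        rw [aStep_mask1 L hL v0 t hp hb,
            show sStep (v0, 1 :: t) = (v0 + 1, 0 :: t) from rfl]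
        refine ih (v0+1) (0 :: t) (o+1)
          (List.pairwise_cons.mpr ⟨fun x hx => by have := htgt x hx; omega, hpt⟩)
          (fun x hx => by
            rcases List.mem_cons.mp hx with h1 | h1
            · omega
            · exact hbt x h1)
          (by omega) (by simp only [List.length_cons] at ho ⊢; push_cast at ho ⊢; omega) ?_ (by omega) (by omega)
        simp only [List.map_cons, List.sum_cons] at hsum ⊢
        have h2 : pvFv (0+1) = 2 := by decide
        have h3 : pvFv (1+1) = 3 := by decide
        omega
      | (h'+2), htgt, hhL =>
        rw [aStep_mask2 L hL v0 h' t hp hb,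
            show sStep (v0, (h'+2) :: t) = (v0, h' :: (h'+1) :: t) from rfl]
        refine ih v0 (h' :: (h'+1) :: t) (o+1)
          (List.pairwise_cons.mpr ⟨fun x hx => by
              rcases List.mem_cons.mp hx with h1 | h1
              · omega
              · have := htgt x h1; omega,
            List.pairwise_cons.mpr ⟨fun x hx => by have := htgt x hx; omega, hpt⟩⟩)
          (fun x hx => by
            rcases List.mem_cons.mp hx with h1 | h1
            · omega
            · rcases List.mem_cons.mp h1 with h2 | h2
              · omega
              · exact hbt x h2)
          hv0 (by simp only [List.length_cons] at ho ⊢; push_cast at ho ⊢; omega) ?_ (by omega) (by omega)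
        simp only [List.map_cons, List.sum_cons] at hsum ⊢
        have hfib : pvFv (h'+2+1) = pvFv (h'+1+1) + pvFv (h'+1) := by
          have := fv_fib (z := h'+3) (by omega) (by omega)
          simpa using this
        omega

-- ===== B-side lemmas: eState characterises sStep-iteration and bExpand =====

lemma ePos : ∀ (x : Nat) (t : Int), 0 ≤ (eState x t).1 := by
  intro x
  induction x using Nat.strong_induction_on with
  | _ x ih =>
    intro t
    match x with
    | 0 => simp only [eState]; split_ifs <;> norm_num
    | 1 => simp only [eState]; split_ifs <;> norm_num
    | (h+2) =>
      simp only [eState]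
      split_ifs with h1 h2
      · norm_num
      · exact ih h (by omega) (t-1)
      · have := ih (h+1) (by omega) (t - pvFv (h+1))
        have := fv_nonneg (h+1)
        omega

lemma Efull : ∀ (x : Nat), x ≤ 17 → eState x (pvFv (x+1) - 1) = (pvFv (x+1), []) := by
  intro x
  induction x using Nat.strong_induction_on with
  | _ x ih =>
    intro hx
    match x with
    | 0 => decide
    | 1 => decide
    | (h+2) =>
      have ha2 : 2 ≤ pvFv (h+1) := fv_ge2 (by omega) (by omega)
      have hb2 : 2 ≤ pvFv (h+2) := fv_ge2 (by omega) (by omega)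
      have hfib : pvFv (h+3) = pvFv (h+2) + pvFv (h+1) := by
        have := fv_fib (z := h+3) (by omega) (by omega)
        simpa using this
      simp only [show h+2+1 = h+3 from rfl, eState]
      rw [if_neg (by omega), if_neg (by omega)]
      have e1 : pvFv (h+3) - 1 - pvFv (h+1) = pvFv (h+1+1) - 1 := by
        simp only [show h+1+1 = h+2 from rfl]
        omega
      rw [e1, ih (h+1) (by omega) (by omega)]
      simp only [show h+1+1 = h+2 from rfl, Prod.mk.injEq]
      exact ⟨by omega, trivial⟩

lemma E1 : ∀ (x : Nat), x ≤ 17 → ∀ (t : Int), 0 ≤ t → t ≤ pvFv (x+1) - 1 →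
    ∀ (c : Int) (rest : List Nat),
      sStep^[t.toNat] (c, x :: rest) = (c + (eState x t).1, (eState x t).2 ++ rest) := by
  intro x
  induction x using Nat.strong_induction_on with
  | _ x ih =>
    intro hx t ht0 htv c rest
    by_cases h0 : t = 0
    · subst h0
      match x with
      | 0 => simp [eState]
      | 1 => simp [eState]
      | (h+2) => simp [eState]
    · have ht1 : 1 ≤ t := by omega
      match x with
      | 0 =>
        have hv : pvFv (0+1) = 2 := by decide
        have ht : t = 1 := by omega
        subst ht
        rw [show ((1:Int)).toNat = 1 from rfl, Function.iterate_one,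
            show sStep (c, 0 :: rest) = (c + 2, rest) from rfl]
        simp [eState]
      | 1 =>
        have hv : pvFv (1+1) = 3 := by decide
        have ht : t = 1 ∨ t = 2 := by omega
        rcases ht with ht | ht <;> subst ht
        · rw [show ((1:Int)).toNat = 1 from rfl, Function.iterate_one,
              show sStep (c, 1 :: rest) = (c + 1, 0 :: rest) from rfl]
          simp [eState]
        · rw [show ((2:Int)).toNat = 2 from rfl,
              show sStep^[2] (c, 1 :: rest) = sStep (sStep (c, 1 :: rest)) from rfl,
              show sStep (c, 1 :: rest) = (c + 1, 0 :: rest) from rfl,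
              show sStep (c + 1, 0 :: rest) = (c + 1 + 2, rest) from rfl]
          simp only [eState]
          norm_num
          omega
      | (h+2) =>
        have ha2 : 2 ≤ pvFv (h+1) := fv_ge2 (by omega) (by omega)
        have hb2 : 2 ≤ pvFv (h+2) := fv_ge2 (by omega) (by omega)
        have hfib : pvFv (h+3) = pvFv (h+2) + pvFv (h+1) := by
          have := fv_fib (z := h+3) (by omega) (by omega)
          simpa using this
        have hsplit1 : t.toNat = (t-1).toNat + 1 := by omega
        rw [hsplit1, Function.iterate_succ_apply,
            show sStep (c, (h+2) :: rest) = (c, h :: (h+1) :: rest) from rfl]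
        by_cases hbr : t - 1 ≤ pvFv (h+1) - 1
        · rw [ih h (by omega) (by omega) (t-1) (by omega) (by omega) c ((h+1) :: rest)]
          simp only [eState, if_neg h0, if_pos hbr]
          simp
        · have htv' : t ≤ pvFv (h+2+1) - 1 := htv
          have hfib' : pvFv (h+2+1) = pvFv (h+2) + pvFv (h+1) := hfib
          have hsplit2 : (t-1).toNat = (t - pvFv (h+1)).toNat + (pvFv (h+1) - 1).toNat := by
            omega
          rw [hsplit2, Function.iterate_add_apply,
              ih h (by omega) (by omega) (pvFv (h+1) - 1) (by omega)
                (le_refl _) c ((h+1) :: rest),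
              Efull h (by omega)]
          simp only [List.nil_append]
          rw [ih (h+1) (by omega) (by omega) (t - pvFv (h+1)) (by omega)
                (by simp only [show h+1+1 = h+2 from rfl]; omega)
                (c + pvFv (h+1)) rest]
          simp only [eState, if_neg h0, if_neg hbr, Prod.mk.injEq]
          exact ⟨by ring, trivial⟩

-- pyRepeat of [1] splits over a nonnegative sum
lemma pyRepeat_add (m n : Int) (hm : 0 ≤ m) (hn : 0 ≤ n) :
    PySem.List.pyRepeat [(1:Int)] (m + n)
      = PySem.List.pyRepeat [(1:Int)] m ++ PySem.List.pyRepeat [(1:Int)] n := by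
  rw [PySem.List.pyRepeat_singleton, PySem.List.pyRepeat_singleton,
      PySem.List.pyRepeat_singleton, show (m+n).toNat = m.toNat + n.toNat from by omega,
      List.replicate_add]

-- bExpand computes exactly the rendering of eState
lemma BE : ∀ (x : Nat), x ≤ 17 → ∀ (t : Int), 0 ≤ t → t ≤ pvFv (x+1) - 1 →
    bExpand (x+1) t
      = PySem.List.pyRepeat [1] (eState x t).1
          ++ ((eState x t).2).map (fun y => pvFv (y+1)) := by
  intro x
  induction x using Nat.strong_induction_on with
  | _ x ih =>
    intro hx t ht0 htv
    by_cases h0 : t = 0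
    · subst h0
      match x with
      | 0 => decide
      | 1 => decide
      | (h+2) =>
        simp only [bExpand, eState, if_pos rfl]
        simp [PySem.List.pyRepeat_singleton]
    · have ht1 : 1 ≤ t := by omega
      match x with
      | 0 =>
        have ht : t = 1 := by
          have hv : pvFv (0+1) = 2 := by decide
          omega
        subst ht
        decide
      | 1 =>
        have ht : t = 1 ∨ t = 2 := by
          have hv : pvFv (1+1) = 3 := by decide
          omega
        rcases ht with ht | ht <;> subst ht <;> decide
      | (h+2) =>
        have ha2 : 2 ≤ pvFv (h+1) := fv_ge2 (by omega) (by omega)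
        have hfib : pvFv (h+3) = pvFv (h+2) + pvFv (h+1) := by
          have := fv_fib (z := h+3) (by omega) (by omega)
          simpa using this
        simp only [show h+2+1 = h+3 from rfl, bExpand, eState, if_neg h0]
        by_cases hbr : t - 1 ≤ pvFv (h+1) - 1
        · rw [if_pos hbr, if_pos hbr,
              ih h (by omega) (by omega) (t-1) (by omega) (by omega)]
          simp
        · rw [if_neg hbr, if_neg hbr,
              ih (h+1) (by omega) (by omega) (t - pvFv (h+1)) (by omega)
                (by simp only [show h+1+1 = h+2 from rfl, show h+2+1 = h+3 from rfl] at htv ⊢; omega)]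
          rw [pyRepeat_add (pvFv (h+1)) ((eState (h+1) (t - pvFv (h+1))).1)
                (by omega) (ePos _ _)]
          simp only [PySem.List.pyRepeat_singleton, List.replicate_add, List.append_assoc]

lemma bExpand_zero : ∀ (j : Nat), bExpand j 0 = [pvFv j] := by
  intro j
  match j with
  | 0 => rfl
  | 1 => rfl
  | 2 => simp [bExpand]
  | (h+3) => simp [bExpand]

lemma bOutJ_map_zero : ∀ (ids : List Nat), (∀ x ∈ ids, x ≤ 17) →
    bOutJ (ids.map (· + 1)) 0 = ids.map (fun x => pvFv (x+1)) := by
  intro ids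
  induction ids with
  | nil => intro _; rfl
  | cons x l ih =>
    intro hb
    have hv : 2 ≤ pvFv (x+1) := fv_ge2 (by omega) (by have := hb x (by simp); omega)
    simp only [List.map_cons, bOutJ]
    rw [show min (0:Int) (pvFv (x+1) - 1) = 0 from by omega, bExpand_zero,
        show (0:Int) - 0 = 0 from by norm_num]
    rw [ih (fun y hy => hb y (List.mem_cons_of_mem _ hy))]
    simp

-- the split iteration, rendered, equals B's per-summand budget expansion
lemma split_sim : ∀ (ids : List Nat), (∀ x ∈ ids, x ≤ 17) → ∀ (c s : Int), 0 ≤ c → 0 ≤ s →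
    s ≤ (ids.map (fun x => pvFv (x+1))).sum - ids.length →
    PySem.List.pyRepeat [1] (sStep^[s.toNat] (c, ids)).1
        ++ ((sStep^[s.toNat] (c, ids)).2).map (fun x => pvFv (x+1))
      = PySem.List.pyRepeat [1] c ++ bOutJ (ids.map (· + 1)) s := by
  intro ids
  induction ids with
  | nil =>
    intro _ c s _ hs0 hsb
    simp only [List.map_nil, List.sum_nil, List.length_nil] at hsb
    have : s = 0 := by omega
    subst this
    rfl
  | cons x l ih =>
    intro hb c s hc0 hs0 hsb
    have hx17 : x ≤ 17 := hb x (by simp)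
    have hbl : ∀ y ∈ l, y ≤ 17 := fun y hy => hb y (List.mem_cons_of_mem _ hy)
    have hv2 : 2 ≤ pvFv (x+1) := fv_ge2 (by omega) (by omega)
    by_cases hle : s ≤ pvFv (x+1) - 1
    · have hmin : min s (pvFv (x+1) - 1) = s := by omega
      rw [E1 x hx17 s hs0 hle c l]
      simp only [List.map_cons, bOutJ, hmin]
      rw [BE x hx17 s hs0 hle, show s - s = (0:Int) from by omega,
          bOutJ_map_zero l hbl,
          pyRepeat_add c (eState x s).1 hc0 (ePos _ _)]
      simp only [PySem.List.pyRepeat_singleton, List.map_append, List.map_nil,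
        List.append_nil, List.nil_append, List.replicate_add, List.append_assoc]
    · have hmin : min s (pvFv (x+1) - 1) = pvFv (x+1) - 1 := by omega
      have hsplit : s.toNat = (s - (pvFv (x+1) - 1)).toNat + (pvFv (x+1) - 1).toNat := by
        omega
      rw [hsplit, Function.iterate_add_apply,
          E1 x hx17 (pvFv (x+1) - 1) (by omega) (le_refl _) c l, Efull x hx17]
      simp only [List.nil_append]
      rw [ih hbl (c + pvFv (x+1)) (s - (pvFv (x+1) - 1)) (by omega) (by omega)
            (by simp only [List.map_cons, List.sum_cons, List.length_cons] at hsb; push_cast at hsb ⊢; omega)]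
      simp only [List.map_cons, bOutJ, hmin]
      rw [BE x hx17 (pvFv (x+1) - 1) (by omega) (le_refl _), Efull x hx17]
      rw [pyRepeat_add c (pvFv (x+1)) hc0 (by omega)]
      simp only [PySem.List.pyRepeat_singleton, List.map_append, List.map_nil,
        List.append_nil, List.nil_append, List.replicate_add, List.append_assoc]

-- facts about the abstract greedy descent gzI
lemma gz_skip {p : Nat} {m : Int} (hp : 1 ≤ p) (hm : m < pvFv p) :
    gzI p m = gzI (p-1) m := by
  match p, hp with
  | (q+1), hp =>
    show gzI (q+1) m = gzI (q+1-1) m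
    simp only [Nat.add_sub_cancel]
    rw [gzI]
    rw [if_neg (by omega)]

lemma gz_zero : ∀ (p : Nat), p ≤ 18 → ∀ m : Int, m ≤ 0 → gzI p m = (0, []) := by
  intro p
  induction p with
  | zero => intro _ m hm; unfold gzI; rw [if_neg (by omega)]
  | succ p ih =>
    intro hp m hm
    unfold gzI
    rw [if_neg (by have := fv_pos (j := p+1) (by omega); omega)]
    exact ih (by omega) m hm

lemma gz_shape : ∀ (p : Nat) (m : Int),
    ((gzI p m).1 = 0 ∨ (gzI p m).1 = 1) ∧ ((gzI p m).2).Pairwise (· < ·) ∧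
      (∀ x ∈ (gzI p m).2, x < p) := by
  intro p
  induction p with
  | zero =>
    intro m
    unfold gzI
    split_ifs <;> simp
  | succ p ih =>
    intro m
    unfold gzI
    split_ifs with h
    · obtain ⟨h1, h2, h3⟩ := ih (m - pvFv (p+1))
      refine ⟨h1, ?_, ?_⟩
      · simp only []
        rw [List.pairwise_append]
        exact ⟨h2, by simp, by intro a ha b hb; simp at hb; subst hb; exact h3 a ha⟩
      · intro x hx
        simp only [List.mem_append, List.mem_singleton] at hx
        rcases hx with hx | hx
        · have := h3 x hx; omega
        · omega
    · obtain ⟨h1, h2, h3⟩ := ih m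
      exact ⟨h1, h2, fun x hx => by have := h3 x hx; omega⟩

lemma gz_sum : ∀ (p : Nat), p ≤ 18 → ∀ m : Int, 0 ≤ m → m < pvFv (p+1) →
    (gzI p m).1 + (((gzI p m).2).map (fun x => pvFv (x+1))).sum = m := by
  intro p
  induction p with
  | zero =>
    intro _ m h0 hm
    have h1 : pvFv (0+1) = 2 := by decide
    unfold gzI
    split_ifs <;> simp <;> omega
  | succ p ih =>
    intro hp m h0 hm
    have e2 : p+1+1 = p+2 := by omega
    rw [e2] at hm
    have hfib : pvFv (p+2) = pvFv (p+1) + pvFv p := by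
      have := fv_fib (z := p+2) (by omega) (by omega)
      simpa using this
    have hmono : pvFv p ≤ pvFv (p+1) := fv_mono (by omega) (by omega)
    unfold gzI
    split_ifs with h
    · have := ih (by omega) (m - pvFv (p+1)) (by omega) (by omega)
      simp only [List.map_append, List.sum_append, List.map_cons, List.map_nil,
        List.sum_cons, List.sum_nil]
      omega
    · exact ih (by omega) m h0 (by omega)

-- where the inner skip loop stops: characterisation of innerStop
lemma innerStop_neg : ∀ (j : Nat), j ≤ 18 → ∀ m : Int, m ≤ 0 → innerStop j m = -1 := by
  intro j
  induction j with
  | zero => intro _ m hm; unfold innerStop; rw [if_neg (by omega)]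
  | succ j ih =>
    intro hj m hm
    unfold innerStop
    rw [if_neg (by have := fv_pos (j := j+1) (by omega); omega)]
    exact ih (by omega) m hm

lemma innerStop_spec : ∀ (j : Nat), j ≤ 18 → ∀ m : Int, 0 < m → m < pvFv (j+1) →
    ∃ q : Nat, q ≤ j ∧ innerStop j m = (q : Int) ∧ pvFv q ≤ m ∧ m < pvFv (q+1) ∧
      gzI j m = gzI q m := by
  intro j
  induction j with
  | zero =>
    intro _ m h0 hm
    refine ⟨0, le_refl _, ?_, by have h1 : pvFv 0 = 1 := (by decide); omega, hm, rfl⟩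
    unfold innerStop
    rw [if_pos (by omega)]
    rfl
  | succ j ih =>
    intro hj m h0 hm
    unfold innerStop
    by_cases h : pvFv (j+1) ≤ m
    · exact ⟨j+1, le_refl _, by rw [if_pos h]; push_cast; ring, h, hm, rfl⟩
    · rw [if_neg h]
      obtain ⟨q, hq1, hq2, hq3, hq4, hq5⟩ := ih (by omega) m h0 (by omega)
      refine ⟨q, by omega, hq2, hq3, hq4, ?_⟩
      rw [show gzI (j+1) m = gzI j m from gz_skip (by omega) (by omega)]
      exact hq5

lemma getD_pvF_natCast (j : Nat) (hj : j ≤ 19) :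
    PySem.List.pyGetD pvF (j : Int) 0 = pvFv j := by
  rw [PySem.List.pyGetD_natCast]
  rfl

-- A's inner skip loop on a masked state: every write is a no-op, and it stops at innerStop
lemma aInner_mask (m : Int) (L : Nat) (ids : List Nat) (hb : ∀ x ∈ ids, x < L) :
    ∀ (j : Nat), j ≤ 18 → j ≤ L → ∀ (fuel : Nat), fuel ≥ j+2 → (∀ x ∈ ids, j ≤ x) →
      aInner m fuel ((j : Int), (0 : Int) :: pvMask L ids)
        = (innerStop j m, 0 :: pvMask L ids) := by
  intro j
  induction j with
  | zero =>
    intro _ _ fuel hfuel hlow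
    match fuel, hfuel with
    | (f+1), _ =>
      unfold aInner
      by_cases h : (1:Int) ≤ m
      · rw [if_neg (by
          push_neg
          intro _
          rw [getD_pvF_natCast 0 (by omega)]
          have h0 : pvFv 0 = 1 := by decide
          omega)]
        unfold innerStop
        rw [if_pos h]
        norm_num
      · rw [if_pos (by
          constructor
          · positivity
          · rw [getD_pvF_natCast 0 (by omega)]
            have h0 : pvFv 0 = 1 := by decide
            omega)]
        rw [show ((0:Nat) : Int) = (0:Int) from rfl, setD_cons_zero]
        match f, (by omega : f ≥ 1) with
        | (f'+1), _ =>
          unfold aInner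
          rw [if_neg (by push_neg; intro h'; exfalso; omega)]
          unfold innerStop
          rw [if_neg (by omega)]
          norm_num
  | succ j ih =>
    intro hj hjL fuel hfuel hlow
    match fuel, hfuel with
    | (f+1), _ =>
      unfold aInner
      by_cases h : pvFv (j+1) ≤ m
      · rw [if_neg (by
          push_neg
          intro _
          rw [getD_pvF_natCast (j+1) (by omega)]
          omega)]
        unfold innerStop
        rw [if_pos h]
        constructor <;> push_cast <;> ring_nf
      · rw [if_pos (by
          refine ⟨by positivity, ?_⟩
          rw [getD_pvF_natCast (j+1) (by omega)]
          omega)]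
        have hnm : j ∉ ids := fun hc => absurd (hlow j hc) (by omega)
        have e1 : ((j+1 : Nat) : Int) = ((j : Nat) : Int) + 1 := by push_cast; ring
        rw [e1, setD_cons_succ _ _ _ _ (by rw [mask_len]; omega),
            mask_set_zero L ids j (by omega) (fun x hx => fun e => hnm (e ▸ hx))]
        rw [show ((j : Nat) : Int) + 1 - 1 = ((j : Nat) : Int) from by ring]
        rw [ih (by omega) (by omega) f (by omega) (fun x hx => by have := hlow x hx; omega),
            show innerStop (j+1) m = innerStop j m from by rw [innerStop, if_neg h]]

-- A's outer Zeckendorf loop computes the abstract greedy descent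
lemma aOuter_mask (L : Nat) (hL : L ≤ 18) :
    ∀ (p : Nat), p ≤ 18 → p ≤ L → ∀ (fuel : Nat), fuel ≥ p+2 → ∀ (m : Int) (ids : List Nat),
      0 < m → pvFv p ≤ m → m < pvFv (p+1) →
      (∀ x ∈ ids, x < L) → (∀ x ∈ ids, p ≤ x) →
      aOuter fuel m (p : Int) (0 :: pvMask L ids)
        = (gzI p m).1 :: pvMask L ((gzI p m).2 ++ ids) := by
  intro p
  induction p using Nat.strong_induction_on with
  | _ p ih =>
    intro hp18 hpL fuel hfuel m ids h0 hle hlt hb hlow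
    match fuel, hfuel with
    | (f+1), _ =>
      unfold aOuter
      rw [if_pos (by omega)]
      simp only []
      rw [getD_pvF_natCast p (by omega)]
      match p, hp18, hpL with
      | 0, hp18, hpL =>
        have hf0 : pvFv 0 = 1 := by decide
        have hf1 : pvFv (0+1) = 2 := by decide
        have hm1 : m = 1 := by omega
        rw [show ((0:Nat) : Int) = (0:Int) from rfl, setD_cons_zero]
        rw [show (0:Int) - 1 = -1 from by ring]
        rw [show aInner (m - pvFv 0) 21 (-1, (1:Int) :: pvMask L ids)
              = (-1, (1:Int) :: pvMask L ids) from by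
          unfold aInner
          rw [if_neg (by push_neg; intro hc; exfalso; omega)]]
        simp only []
        rw [show m - pvFv 0 = 0 from by omega]
        match f, (by omega : f ≥ 1) with
        | (f'+1), _ =>
          unfold aOuter
          rw [if_neg (by omega)]
          unfold gzI
          rw [if_pos (by omega)]
          rfl
      | (p+1), hp18, hpL =>
        have hnm : p ∉ ids := fun hc => absurd (hlow p hc) (by omega)
        have e1 : ((p+1 : Nat) : Int) = ((p : Nat) : Int) + 1 := by push_cast; ring
        rw [e1, setD_cons_succ _ _ _ _ (by rw [mask_len]; omega),
            mask_set_one L ids p (by omega) hnm]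
        rw [show ((p : Nat) : Int) + 1 - 1 = ((p : Nat) : Int) from by ring]
        set m1 := m - pvFv (p+1) with hm1
        have hfib : pvFv (p+1+1) = pvFv (p+1) + pvFv p := by
          have := fv_fib (z := p+2) (by omega) (by omega)
          simp only [show p+2-1 = p+1 from by omega, show p+2-2 = p from by omega] at this
          rw [show p+1+1 = p+2 from by omega]
          exact this
        have hm1lt : m1 < pvFv p := by omega
        have hm1nn : 0 ≤ m1 := by omega
        by_cases hz : m1 = 0
        · rw [aInner_mask m1 L (p :: ids)
                (fun x hx => by
                  rcases List.mem_cons.mp hx with h1 | h1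
                  · omega
                  · exact hb x h1)
                p (by omega) (by omega) 21 (by omega)
                (fun x hx => by
                  rcases List.mem_cons.mp hx with h1 | h1
                  · omega
                  · have := hlow x h1; omega)]
          rw [innerStop_neg p (by omega) m1 (by omega)]
          simp only []
          match f, (by omega : f ≥ 1) with
          | (f'+1), _ =>
            unfold aOuter
            rw [if_neg (by omega)]
            rw [show gzI (p+1) m = ((gzI p m1).1, (gzI p m1).2 ++ [p]) from by
              rw [gzI, if_pos (by omega)]]
            rw [gz_zero p (by omega) m1 (by omega)]
            simp
        · have hm1pos : 0 < m1 := by omega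
          rw [aInner_mask m1 L (p :: ids)
                (fun x hx => by
                  rcases List.mem_cons.mp hx with h1 | h1
                  · omega
                  · exact hb x h1)
                p (by omega) (by omega) 21 (by omega)
                (fun x hx => by
                  rcases List.mem_cons.mp hx with h1 | h1
                  · omega
                  · have := hlow x h1; omega)]
          obtain ⟨q, hq1, hq2, hq3, hq4, hq5⟩ :=
            innerStop_spec p (by omega) m1 hm1pos (by
              have : pvFv p ≤ pvFv (p+1) := fv_mono (by omega) (by omega)
              omega)
          rw [hq2]
          simp only []
          rw [ih q (by omega) (by omega) (by omega) f (by omega) m1 (p :: ids)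
                hm1pos hq3 hq4
                (fun x hx => by
                  rcases List.mem_cons.mp hx with h1 | h1
                  · omega
                  · exact hb x h1)
                (fun x hx => by
                  rcases List.mem_cons.mp hx with h1 | h1
                  · omega
                  · have := hlow x h1; omega)]
          rw [show gzI (p+1) m = ((gzI p m1).1, (gzI p m1).2 ++ [p]) from by
            rw [gzI, if_pos (by omega)]]
          rw [hq5]
          simp

-- phase 1 of A: the index search stops exactly at the greedy start index
lemma findI_eq (n : Int) (q : Nat) (hq18 : q ≤ 18) (hle : pvFv q ≤ n) (hlt : n < pvFv (q+1)) :
    ∀ (c j : Nat), j + c = q + 1 → j ≤ q → ∀ (fuel : Nat), fuel ≥ c →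
      aFindI n fuel j = q := by
  intro c
  induction c with
  | zero => intro j hc _ _ _; omega
  | succ c ih =>
    intro j hc hj fuel hfuel
    match fuel, hfuel with
    | (f+1), _ =>
      unfold aFindI
      by_cases hjq : j = q
      · subst hjq
        rw [if_pos (by
          rw [getD_pvF_natCast j (by omega)]
          rw [show ((j:Int)+1) = ((j+1 : Nat) : Int) from by push_cast; ring,
              getD_pvF_natCast (j+1) (by omega)]
          exact ⟨hle, hlt⟩)]
      · rw [if_neg (by
          rw [getD_pvF_natCast j (by omega)]
          rw [show ((j:Int)+1) = ((j+1 : Nat) : Int) from by push_cast; ring,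
              getD_pvF_natCast (j+1) (by omega)]
          push_neg
          intro _
          have : pvFv (j+1) ≤ pvFv q := fv_mono (by omega) (by omega)
          omega)]
        exact ih (j+1) (by omega) (by omega) f (by omega)

lemma mask_nil (L : Nat) : pvMask L [] = List.replicate L 0 := by
  unfold pvMask
  apply List.eq_replicate_iff.mpr
  constructor
  · simp
  · intro b hb
    simp only [List.mem_map] at hb
    obtain ⟨j, _, hj⟩ := hb
    simpa using hj.symm

-- counting the 1-entries of a masked vector
lemma count_mask (L : Nat) (ids : List Nat) (hp : ids.Pairwise (· < ·))
    (hb : ∀ x ∈ ids, x < L) :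
    (pvMask L ids).count 1 = ids.length := by
  have hcp : (pvMask L ids).count 1
      = (List.range L).countP (fun j => decide (j ∈ ids)) := by
    rw [List.count_eq_countP, pvMask, List.countP_map]
    apply List.countP_congr
    intro j _
    by_cases hj : j ∈ ids <;> simp [hj]
  rw [hcp, List.countP_eq_length_filter]
  have hnd : ids.Nodup := hp.imp (fun {a b} h => Nat.ne_of_lt h)
  have hperm : ((List.range L).filter (fun j => decide (j ∈ ids))).Perm ids := by
    apply List.perm_of_nodup_nodup_toFinset_eq
    · exact (List.nodup_range).filter _
    · exact hnd
    · ext x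
      simp only [List.mem_toFinset, List.mem_filter, List.mem_range, decide_eq_true_eq]
      exact ⟨fun ⟨_, h2⟩ => h2, fun h => ⟨hb x h, h⟩⟩
  exact hperm.length_eq

lemma count_mask_cons (L : Nat) (v0 : Int) (ids : List Nat) (hp : ids.Pairwise (· < ·))
    (hb : ∀ x ∈ ids, x < L) (hv : v0 = 0 ∨ v0 = 1) :
    ((PySem.List.count ((v0 :: pvMask L ids)) (1:Int) : Nat) : Int) = v0 + ids.length := by
  unfold PySem.List.count
  rw [List.count_cons, count_mask L ids hp hb]
  rcases hv with hv | hv <;> subst hv <;> simp <;> omega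

-- the Fibonacci table with the top element first, for peeling the reversed folds
lemma take_rev (p : Nat) (hp : p < 20) :
    (pvF.take (p+1)).reverse = pvFv p :: (pvF.take p).reverse := by
  rw [List.take_succ]
  have hlen : pvF.length = 20 := by decide
  rw [List.getElem?_eq_getElem (by omega)]
  simp only [Option.toList_some, List.reverse_append, List.reverse_singleton,
    List.singleton_append]
  congr 1
  rw [pvFv, List.getD_eq_getElem _ _ (by omega)]

lemma pvF_take_20 : pvF.take 20 = pvF := by decide

-- B's phase-1 fold collects exactly the greedy indices, largest first
lemma bFoldIdx : ∀ (p : Nat), p ≤ 19 → ∀ (m : Int) (acc : List Nat),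
    ∃ r, ((List.range (p+1)).reverse).foldl
        (fun (st : Int × List Nat) j =>
          if pvFv j ≤ st.1 then (st.1 - pvFv j, st.2 ++ [j]) else st)
        (m, acc)
      = (r, acc ++ (gzJ p m).reverse) := by
  intro p
  induction p with
  | zero =>
    intro _ m acc
    have h1 : pvFv 0 = 1 := by decide
    simp only [show (0:Nat)+1 = 1 from rfl, List.range_one, List.reverse_singleton,
      List.foldl_cons, List.foldl_nil]
    by_cases h : (1:Int) ≤ m
    · refine ⟨m - pvFv 0, ?_⟩
      have e : gzI 0 m = (1, []) := by unfold gzI; rw [if_pos h]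
      rw [if_pos (by rw [show pvFv 0 = 1 from by decide]; exact h)]
      unfold gzJ
      rw [e]
      simp
    · refine ⟨m, ?_⟩
      have e : gzI 0 m = (0, []) := by unfold gzI; rw [if_neg h]
      rw [if_neg (by rw [show pvFv 0 = 1 from by decide]; omega)]
      unfold gzJ
      rw [e]
      simp
  | succ p ih =>
    intro hp m acc
    rw [show List.range (p+1+1) = List.range (p+1) ++ [p+1] from List.range_succ,
        List.reverse_append, List.reverse_singleton, List.singleton_append, List.foldl_cons]
    by_cases h : pvFv (p+1) ≤ m
    · rw [if_pos h]
      obtain ⟨r, hr⟩ := ih (by omega) (m - pvFv (p+1)) (acc ++ [p+1])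
      refine ⟨r, ?_⟩
      rw [hr]
      rw [show gzJ (p+1) m = gzJ p (m - pvFv (p+1)) ++ [p+1] from by
        unfold gzJ
        rw [show gzI (p+1) m = ((gzI p (m - pvFv (p+1))).1,
              (gzI p (m - pvFv (p+1))).2 ++ [p]) from by rw [gzI, if_pos h]]
        simp [List.append_assoc]]
      simp
    · rw [if_neg h]
      obtain ⟨r, hr⟩ := ih (by omega) m acc
      refine ⟨r, ?_⟩
      rw [hr, show gzJ (p+1) m = gzJ p m from by
        unfold gzJ
        rw [show gzI (p+1) m = gzI p m from by rw [gzI, if_neg h]]]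

-- with a zero budget the loop leaves every summand alone
lemma bOutJ_zero : ∀ (rest : List Nat), (∀ j ∈ rest, j ≤ 19) →
    bOutJ rest 0 = rest.map (fun j => pvFv j) := by
  intro rest
  induction rest with
  | nil => intro _; rfl
  | cons j r ih =>
    intro hb
    have hv : 1 ≤ pvFv j := fv_pos (hb j (by simp))
    simp only [bOutJ, List.map_cons]
    rw [show min (0:Int) (pvFv j - 1) = 0 from by omega, bExpand_zero,
        show (0:Int) - 0 = 0 from by norm_num, ih (fun x hx => hb x (List.mem_cons_of_mem _ hx))]
    simp

-- B's budget loop computes bOutJ whenever the budget is within the total capacity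
lemma bGo_eq_bOutJ : ∀ (rest : List Nat), (∀ j ∈ rest, j ≤ 19) → ∀ (s : Int), 0 ≤ s →
    s ≤ ((rest.map (fun j => pvFv j - 1)).sum) →
    bGo rest s = bOutJ rest s := by
  intro rest
  induction rest with
  | nil => intro _ s _ _; rfl
  | cons j r ih =>
    intro hb s hs0 hsb
    have hv : 1 ≤ pvFv j := fv_pos (hb j (by simp))
    have hbr : ∀ x ∈ r, x ≤ 19 := fun x hx => hb x (List.mem_cons_of_mem _ hx)
    have hsum_r : 0 ≤ ((r.map (fun j => pvFv j - 1)).sum) := by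
      apply List.sum_nonneg
      intro x hx
      simp only [List.mem_map] at hx
      obtain ⟨y, hy, hxy⟩ := hx
      have := fv_pos (hbr y hy)
      omega
    by_cases hs : 0 < s
    · simp only [bGo, if_pos hs, bOutJ]
      congr 1
      apply ih hbr
      · omega
      · simp only [List.map_cons, List.sum_cons] at hsb
        omega
    · have : s = 0 := by omega
      subst this
      simp only [bGo, if_neg hs]
      rw [bOutJ_zero (j :: r) hb]

-- summand capacities sum to (total value) - (number of summands)
lemma sum_map_sub_one : ∀ (l : List Nat),
    ((l.map (fun x => pvFv (x+1) - 1)).sum) = ((l.map (fun x => pvFv (x+1))).sum) - l.length := by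
  intro l
  induction l with
  | nil => simp
  | cons x r ih =>
    simp only [List.map_cons, List.sum_cons, List.length_cons, ih]
    push_cast
    ring

-- the Pre_ helper pvZeckLen counts the summands of the same greedy descent
lemma zFold : ∀ (p : Nat), p ≤ 19 → ∀ (m c : Int),
    ∃ r, ((pvF.take (p+1)).reverse).foldl
        (fun (s : Int × Int) f => if f ≤ s.1 then (s.1 - f, s.2 + 1) else s) (m, c)
      = (r, c + (gzI p m).1 + ((gzI p m).2).length) := by
  intro p
  induction p with
  | zero =>
    intro _ m c
    have hstep : pvF.take 1 = [1] := by decide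
    rw [hstep]
    show ∃ r, (if (1:Int) ≤ m then (m - 1, c + 1) else (m, c)) = _
    unfold gzI
    by_cases h : (1:Int) ≤ m
    · exact ⟨m - 1, by rw [if_pos h, if_pos h]; simp⟩
    · exact ⟨m, by rw [if_neg h, if_neg h]; simp⟩
  | succ p ih =>
    intro hp m c
    rw [take_rev (p+1) (by omega), List.foldl_cons]
    by_cases h : pvFv (p+1) ≤ m
    · rw [if_pos h]
      obtain ⟨r, hr⟩ := ih (by omega) (m - pvFv (p+1)) (c + 1)
      refine ⟨r, ?_⟩
      rw [hr, show gzI (p+1) m = ((gzI p (m - pvFv (p+1))).1,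
            (gzI p (m - pvFv (p+1))).2 ++ [p]) from by rw [gzI, if_pos h]]
      simp only [List.length_append, List.length_cons, List.length_nil, Prod.mk.injEq]
      exact ⟨trivial, by push_cast; ring⟩
    · rw [if_neg h]
      obtain ⟨r, hr⟩ := ih (by omega) m c
      exact ⟨r, by rw [hr, show gzI (p+1) m = gzI p m from by rw [gzI, if_neg h]]⟩

-- ===== VERDICT (by name: the statement is the Claim_ definition above) =====
theorem fibonacciSnowman_spec : Claim_equal_fibonacciSnowman := by
  unfold Claim_equal_fibonacciSnowman Spec_fibonacciSnowman Pre_fibonacciSnowman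
  intro n k _ hpre
  obtain ⟨h1, h2, h3, h4⟩ := hpre
  have hfv19 : pvFv (18+1) = 10946 := by decide
  have hfv19' : pvFv 19 = 10946 := by decide
  obtain ⟨L, hL18, hstop, hLle, hLlt, hgz18⟩ :=
    innerStop_spec 18 (by omega) n (by omega) (by omega)
  set g1 := (gzI L n).1 with hg1
  set ids₀ := (gzI L n).2 with hids₀
  obtain ⟨hg01, hp₀, hb₀⟩ := gz_shape L n
  rw [← hg1] at hg01
  rw [← hids₀] at hp₀ hb₀
  have hsum₀ := gz_sum L (by omega) n (by omega) hLlt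
  rw [← hg1, ← hids₀] at hsum₀
  have hfind : aFindI n 20 0 = L :=
    findI_eq n L hL18 hLle hLlt (L+1) 0 (by omega) (by omega) 20 (by omega)
  have houter : aOuter 21 n (L : Int) ((0:Int) :: pvMask L [])
      = g1 :: pvMask L ids₀ := by
    rw [aOuter_mask L hL18 L hL18 (le_refl L) 21 (by omega) n []
        (by omega) hLle hLlt (by simp) (by simp)]
    simp only [List.append_nil]
    rfl
  set oInt : Int := ((PySem.List.count (g1 :: pvMask L ids₀) (1:Int) : Nat) : Int) with hoInt
  have hcount : oInt = g1 + ids₀.length :=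
    count_mask_cons L g1 ids₀ hp₀ hb₀ hg01
  -- the minimal summand count in Pre_ is the size of the greedy representation
  have hzl : pvZeckLen n = g1 + ids₀.length := by
    obtain ⟨r, hr⟩ := zFold 19 (by omega) n 0
    unfold pvZeckLen
    rw [← pvF_take_20, hr,
        show gzI 19 n = gzI 18 n from gz_skip (by omega) (by omega), hgz18]
    simp only [zero_add]
    rfl
  have hok : oInt ≤ k := by omega
  obtain ⟨v0', ids', hp', hb', hv0', hA, hS⟩ :=
    phase2_sim L hL18 n k h4 ((k - oInt).toNat) g1 ids₀ oInt hp₀ hb₀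
      (by rcases hg01 with h | h <;> omega) hcount hsum₀ hok rfl
  have hAeq : fibonacciSnowman n k
      = aRender (aLoop k ((k - oInt).toNat) (g1 :: pvMask L ids₀) oInt) := by
    unfold fibonacciSnowman
    rw [hfind]
    simp only []
    rw [show List.replicate (L+1) (0:Int) = (0:Int) :: pvMask L [] from by
      rw [mask_nil, List.replicate_succ], houter]
  -- A's value, via the masked simulation and the renderer
  have hAval : fibonacciSnowman n k
      = PySem.List.pyRepeat [1] v0' ++ ids'.map (fun x => pvFv (x+1)) := by
    rw [hAeq, hA, render_mask v0' L ids' hL18 hp' hb']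
  -- the same value via B's budgeted expansion
  have hsim := split_sim ids₀ (fun x hx => by have := hb₀ x hx; omega) g1 (k - oInt)
      (by rcases hg01 with h | h <;> omega) (by omega)
      (by push_cast at hcount ⊢; omega)
  rw [show (k - oInt).toNat = (k - oInt).toNat from rfl, hS] at hsim
  -- B's port computes exactly the right-hand side of hsim
  have hBval : fibonacciSnowman_alt n k
      = PySem.List.pyRepeat [1] g1 ++ bOutJ (ids₀.map (· + 1)) (k - oInt) := by
    unfold fibonacciSnowman_alt
    simp only []
    rw [show pvF.length = 20 from by decide]
    obtain ⟨r, hr⟩ := bFoldIdx 19 (by omega) n []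
    rw [show (20:Nat) = 19+1 from rfl, hr]
    simp only [List.nil_append, List.reverse_reverse]
    have hgzJ : gzJ 19 n = (if g1 = 1 then [0] else []) ++ ids₀.map (· + 1) := by
      unfold gzJ
      rw [show gzI 19 n = gzI 18 n from gz_skip (by omega) (by omega), hgz18]
    rw [hgzJ]
    have hs0 : 0 ≤ k - oInt := by omega
    have hmb : ∀ j ∈ ids₀.map (· + 1), j ≤ 19 := by
      intro j hj
      simp only [List.mem_map] at hj
      obtain ⟨x, hx, hxj⟩ := hj
      have := hb₀ x hx
      omega
    have hcap : k - oInt ≤ (((ids₀.map (· + 1)).map (fun j => pvFv j - 1)).sum) := by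
      rw [List.map_map]
      have he : ((ids₀.map ((fun j => pvFv j - 1) ∘ (· + 1))).sum)
          = ((ids₀.map (fun x => pvFv (x+1) - 1)).sum) := rfl
      rw [he, sum_map_sub_one]
      omega
    rcases hg01 with hg | hg
    · rw [hg]
      simp only [if_neg (by norm_num : ¬ ((0:Int) = 1)), List.nil_append]
      have hlen : ((ids₀.map (· + 1)).length : Int) = oInt := by
        simp only [List.length_map]
        omega
      rw [hlen, bGo_eq_bOutJ (ids₀.map (· + 1)) hmb (k - oInt) hs0 hcap]
      simp [PySem.List.pyRepeat_singleton, hg]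
    · rw [hg]
      rw [show (if (1:Int) = 1 then ([0]:List Nat) else []) = [0] from by norm_num]
      simp only [List.singleton_append]
      have hlen : (((0 :: ids₀.map (· + 1)).length) : Int) = oInt := by
        simp only [List.length_cons, List.length_map]
        push_cast
        omega
      have hmb0 : ∀ j ∈ (0 :: ids₀.map (· + 1)), j ≤ 19 := by
        intro j hj
        rcases List.mem_cons.mp hj with h | h
        · omega
        · exact hmb j h
      have hcap0 : k - oInt ≤ (((0 :: ids₀.map (· + 1)).map (fun j => pvFv j - 1)).sum) := by
        simp only [List.map_cons, List.sum_cons]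
        rw [show pvFv 0 - 1 = 0 from by decide]
        omega
      rw [hlen, bGo_eq_bOutJ (0 :: ids₀.map (· + 1)) hmb0 (k - oInt) hs0 hcap0]
      simp only [bOutJ]
      rw [show pvFv 0 - 1 = 0 from by decide, show min (k - oInt) (0:Int) = 0 from by omega,
          bExpand_zero, show (k - oInt) - 0 = k - oInt from by ring]
      rw [show pvFv 0 = 1 from by decide]
      rw [show PySem.List.pyRepeat [(1:Int)] 1 = [1] from by decide]
  rw [hAval, hBval, ← hsim]
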